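-- pv_equiv track=rewrite | github.com/17mirinae/CTF-Python | Python/SEOKCHAN/브루트포스/1.블랙잭.py | solve
-- ===== SOURCE A (Python) =====
-- def solve(n, cards):
--
--     items = []
--
--     for i in range(len(cards)):
--         for j in range(len(cards)):
--             for k in range(len(cards)):
--                 if any([i == j, j == k, k == i]):
--                     continue
--
--                 sum_res = sum([cards[i], cards[j], cards[k]])
--                 if sum_res <= n:
--                     items.append(sum_res)
--
--     return max(items)
-- ===== SOURCE B (Python) =====
-- def solve(n, cards):
--     # Sort once, then for each choice of the largest card do a two-pointer
--     # sweep over the prefix: O(len^2) instead of A's O(len^3).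
--     xs = sorted(cards)
--     best = None
--     for k in range(2, len(xs)):
--         t = n - xs[k]
--         i, j = 0, k - 1
--         while i < j:
--             s = xs[i] + xs[j]
--             if s <= t:
--                 cand = s + xs[k]
--                 if best is None or cand > best:
--                     best = cand
--                 i += 1
--             else:
--                 j -= 1
--     return best
-- ===== Notes on version B (the rewrite author's own statement) =====
-- stated objective: faster
-- what changed: Replaces A's triple loop over all distinct index permutations (collecting every admissible sum into a list and taking max) with sort-once, then for each largest card a two-pointer sweep over the sorted prefix keeping a running best; Pre_ excludes exactly the inputs where A raises ValueError (fewer than 3 cards, or no 3-card sum <= n), where B returns None.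
import Mathlib
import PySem

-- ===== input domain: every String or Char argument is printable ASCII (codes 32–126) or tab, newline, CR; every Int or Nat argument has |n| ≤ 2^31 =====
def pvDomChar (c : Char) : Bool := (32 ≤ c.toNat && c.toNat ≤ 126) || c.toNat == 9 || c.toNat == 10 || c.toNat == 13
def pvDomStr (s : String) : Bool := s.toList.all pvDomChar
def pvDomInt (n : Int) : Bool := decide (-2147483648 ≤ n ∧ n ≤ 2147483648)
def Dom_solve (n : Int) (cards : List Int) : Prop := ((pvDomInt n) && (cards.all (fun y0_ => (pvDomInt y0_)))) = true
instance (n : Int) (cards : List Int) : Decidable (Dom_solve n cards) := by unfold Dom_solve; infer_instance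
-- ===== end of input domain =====

-- B replaces A's scan of all distinct index triples by sort-once plus a per-largest-card two-pointer sweep.

-- ===== PORT A =====
def solve (n : Int) (cards : List Int) : Int :=
  let L : Int := cards.length
  let items : List Int :=
    (PySem.List.pyRange 0 L 1).foldl (fun acc i =>
      (PySem.List.pyRange 0 L 1).foldl (fun acc j =>
        (PySem.List.pyRange 0 L 1).foldl (fun acc k =>
          if i = j ∨ j = k ∨ k = i then acc
          else
            let sum_res := PySem.List.pyGetD cards i 0 + PySem.List.pyGetD cards j 0 + PySem.List.pyGetD cards k 0
            if sum_res ≤ n then acc ++ [sum_res] else acc) acc) acc) []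
  -- max(items): ValueError on the empty list, excluded by Pre_solve
  (PySem.List.max? items (fun x => x)).getD 0

-- ===== PORT B =====
-- the 'while i < j' loop of Source B; i, j are the (always nonnegative) Python ints, kept as Nat
def twoPtr (xs : List Int) (t xk : Int) (i j : Nat) (best : Option Int) : Option Int :=
  if i < j then
    let s := xs.getD i 0 + xs.getD j 0
    if s ≤ t then
      let cand := s + xk
      let best' := match best with
        | none => some cand
        | some b => if b < cand then some cand else some b
      twoPtr xs t xk (i + 1) j best'
    else
      twoPtr xs t xk i (j - 1) best
  else best
termination_by j - i
decreasing_by all_goals omega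

def solve_alt (n : Int) (cards : List Int) : Int :=
  let xs := PySem.List.sorted cards (fun x => x) false
  let best := (PySem.List.pyRange 2 (xs.length : Int) 1).foldl
    (fun best k =>
      twoPtr xs (n - PySem.List.pyGetD xs k 0) (PySem.List.pyGetD xs k 0) 0 (k.toNat - 1) best)
    none
  best.getD 0  -- Source B returns None (no value of type int) when best was never set; those inputs are outside Pre_solve

-- ===== PRECONDITION & SPEC =====
-- Pre_solve excludes exactly the inputs on which A raises ValueError (max() of an empty list):
-- fewer than 3 cards, or no sum of 3 cards at distinct positions is ≤ n.  Source B returns None there.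
def Pre_solve (n : Int) (cards : List Int) : Prop :=
  ∃ k < cards.length, ∃ j < k, ∃ i < j,
    cards.getD i 0 + cards.getD j 0 + cards.getD k 0 ≤ n
instance (n : Int) (cards : List Int) : Decidable (Pre_solve n cards) := by unfold Pre_solve; infer_instance

def pvWitness_solve : Int × List Int := (21, [5, 6, 7, 1])

def Spec_solve (n : Int) (cards : List Int) (out : Int) : Prop := out = solve_alt n cards
instance (n : Int) (cards : List Int) (out : Int) : Decidable (Spec_solve n cards out) := by unfold Spec_solve; infer_instance

-- ===== CLAIM (what is proved, stated in full; the proofs are below) =====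
def Claim_equal_solve : Prop := ∀ (n : Int) (cards : List Int), Dom_solve n cards → Pre_solve n cards → Spec_solve n cards (solve n cards)

-- ===== LEMMAS AND PROOFS =====

-- x is the sum of the entries at three strictly increasing positions of l
def OrdT (l : List Int) (x : Int) : Prop :=
  ∃ i j k : Nat, i < j ∧ j < k ∧ k < l.length ∧ x = l.getD i 0 + l.getD j 0 + l.getD k 0

-- x is the sum of some 3-element submultiset of l
def HasT (l : List Int) (x : Int) : Prop :=
  ∃ a b c : Int, [a, b, c].Subperm l ∧ x = a + b + c

-- the list A's triple loop builds (proof name for the let-bound 'items' of solve)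
def itemsA (n : Int) (cards : List Int) : List Int :=
  (PySem.List.pyRange 0 (cards.length : Int) 1).foldl (fun acc i =>
    (PySem.List.pyRange 0 (cards.length : Int) 1).foldl (fun acc j =>
      (PySem.List.pyRange 0 (cards.length : Int) 1).foldl (fun acc k =>
        if i = j ∨ j = k ∨ k = i then acc
        else
          let sum_res := PySem.List.pyGetD cards i 0 + PySem.List.pyGetD cards j 0 + PySem.List.pyGetD cards k 0
          if sum_res ≤ n then acc ++ [sum_res] else acc) acc) acc) []

-- B's outer fold (proof name for the let-bound 'best' of solve_alt)
def bestB (n : Int) (xs : List Int) (K : Nat) : Option Int :=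
  (PySem.List.pyRange 2 (K : Int) 1).foldl
    (fun best k =>
      twoPtr xs (n - PySem.List.pyGetD xs k 0) (PySem.List.pyGetD xs k 0) 0 (k.toNat - 1) best)
    none

lemma up2 {α : Type} [Inhabited α] : ∀ (l : List α) (i j : Nat), i < j → j < l.length →
    List.Sublist [l.getD i default, l.getD j default] l := by
  intro l
  induction l with
  | nil => intro i j h1 h2; simp at h2
  | cons x t ih =>
    intro i j h1 h2
    obtain ⟨j', rfl⟩ : ∃ j', j = j' + 1 := ⟨j - 1, by omega⟩
    cases i with
    | zero =>
      simp only [List.getD_cons_zero, List.getD_cons_succ]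
      refine List.Sublist.cons₂ x (List.singleton_sublist.mpr ?_)
      have hj : j' < t.length := by simp at h2; omega
      rw [List.getD_eq_getElem _ _ hj]
      exact List.getElem_mem hj
    | succ i' =>
      simp only [List.getD_cons_succ]
      exact (ih i' j' (by omega) (by simp at h2; omega)).cons x

lemma up3 {α : Type} [Inhabited α] : ∀ (l : List α) (i j k : Nat), i < j → j < k → k < l.length →
    List.Sublist [l.getD i default, l.getD j default, l.getD k default] l := by
  intro l
  induction l with
  | nil => intro i j k h1 h2 h3; simp at h3
  | cons x t ih =>
    intro i j k h1 h2 h3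
    obtain ⟨j', rfl⟩ : ∃ j', j = j' + 1 := ⟨j - 1, by omega⟩
    obtain ⟨k', rfl⟩ : ∃ k', k = k' + 1 := ⟨k - 1, by omega⟩
    cases i with
    | zero =>
      simp only [List.getD_cons_zero, List.getD_cons_succ]
      exact List.Sublist.cons₂ x (up2 t j' k' (by omega) (by simp at h3; omega))
    | succ i' =>
      simp only [List.getD_cons_succ]
      exact (ih i' j' k' (by omega) (by omega) (by simp at h3; omega)).cons x

lemma sub2 : ∀ {l : List Int} {a b : Int}, List.Sublist [a, b] l →
    ∃ i j : Nat, i < j ∧ j < l.length ∧ l.getD i 0 = a ∧ l.getD j 0 = b := by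
  intro l
  induction l with
  | nil => intro a b h; simp at h
  | cons x t ih =>
    intro a b h
    rcases h with _ | ⟨h, _⟩ | h
    case cons h =>
      obtain ⟨i, j, h1, h2, h3, h4⟩ := ih h
      exact ⟨i + 1, j + 1, by omega, by simp; omega, by simpa, by simpa⟩
    case cons₂ h =>
      have hb : b ∈ t := List.singleton_sublist.mp h
      obtain ⟨j, hj, rfl⟩ := List.getElem_of_mem hb |>.imp fun j hj => hj
      exact ⟨0, j + 1, by omega, by simp; omega, rfl,
        by rw [List.getD_cons_succ, List.getD_eq_getElem _ _ hj]⟩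

lemma sub3 : ∀ {l : List Int} {a b c : Int}, List.Sublist [a, b, c] l →
    ∃ i j k : Nat, i < j ∧ j < k ∧ k < l.length ∧ l.getD i 0 = a ∧ l.getD j 0 = b ∧ l.getD k 0 = c := by
  intro l
  induction l with
  | nil => intro a b c h; simp at h
  | cons x t ih =>
    intro a b c h
    rcases h with _ | ⟨h, _⟩ | h
    case cons h =>
      obtain ⟨i, j, k, h1, h2, h3, h4, h5, h6⟩ := ih h
      exact ⟨i + 1, j + 1, k + 1, by omega, by omega, by simp; omega, by simpa, by simpa, by simpa⟩
    case cons₂ h =>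
      obtain ⟨i, j, h1, h2, h3, h4⟩ := sub2 h
      exact ⟨0, i + 1, j + 1, by omega, by omega, by simp; omega, rfl, by simpa, by simpa⟩

lemma ordT_iff_hasT (l : List Int) (x : Int) : OrdT l x ↔ HasT l x := by
  constructor
  · rintro ⟨i, j, k, h1, h2, h3, rfl⟩
    exact ⟨l.getD i 0, l.getD j 0, l.getD k 0, (up3 l i j k h1 h2 h3).subperm, rfl⟩
  · rintro ⟨a, b, c, hsub, rfl⟩
    obtain ⟨l', hp, hs⟩ := hsub
    obtain ⟨p, q, r, rfl⟩ : ∃ p q r, l' = [p, q, r] := by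
      have := hp.length_eq
      match l', this with
      | [p, q, r], _ => exact ⟨p, q, r, rfl⟩
    obtain ⟨i, j, k, h1, h2, h3, h4, h5, h6⟩ := sub3 hs
    refine ⟨i, j, k, h1, h2, h3, ?_⟩
    have hsum := hp.sum_eq
    simp at hsum
    omega

lemma hasT_perm {l l' : List Int} (h : l.Perm l') (x : Int) : HasT l x ↔ HasT l' x := by
  unfold HasT
  constructor
  · rintro ⟨a, b, c, hs, hx⟩; exact ⟨a, b, c, h.subperm_left.mp hs, hx⟩
  · rintro ⟨a, b, c, hs, hx⟩; exact ⟨a, b, c, h.subperm_left.mpr hs, hx⟩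

lemma ordT_iff_of_perm {l l' : List Int} (h : l.Perm l') (x : Int) : OrdT l x ↔ OrdT l' x := by
  rw [ordT_iff_hasT, ordT_iff_hasT]; exact hasT_perm h x

-- any pairwise-distinct index triple can be reordered increasingly, preserving the sum
lemma distinct_to_ordT (l : List Int) (x : Int) (i j k : Nat)
    (hij : i ≠ j) (hjk : j ≠ k) (hki : k ≠ i) (hi : i < l.length) (hj : j < l.length) (hk : k < l.length)
    (hx : x = l.getD i 0 + l.getD j 0 + l.getD k 0) : OrdT l x := by
  rcases Nat.lt_trichotomy i j with h1 | h1 | h1 <;>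
  rcases Nat.lt_trichotomy j k with h2 | h2 | h2 <;>
  rcases Nat.lt_trichotomy i k with h3 | h3 | h3 <;>
  first
  | omega
  | exact ⟨i, j, k, by omega, by omega, by omega, by omega⟩
  | exact ⟨i, k, j, by omega, by omega, by omega, by omega⟩
  | exact ⟨j, i, k, by omega, by omega, by omega, by omega⟩
  | exact ⟨j, k, i, by omega, by omega, by omega, by omega⟩
  | exact ⟨k, i, j, by omega, by omega, by omega, by omega⟩
  | exact ⟨k, j, i, by omega, by omega, by omega, by omega⟩

-- closed form of A's items list: it holds exactly the admissible triple sums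
lemma mem_items (n : Int) (cards : List Int) (x : Int) :
    x ∈ itemsA n cards ↔ OrdT cards x ∧ x ≤ n := by
  have key1 : ∀ (acc : List Int) (i j : Int),
      (PySem.List.pyRange 0 (cards.length : Int) 1).foldl (fun acc k =>
        if i = j ∨ j = k ∨ k = i then acc
        else
          let sum_res := PySem.List.pyGetD cards i 0 + PySem.List.pyGetD cards j 0 + PySem.List.pyGetD cards k 0
          if sum_res ≤ n then acc ++ [sum_res] else acc) acc
      = acc ++ ((PySem.List.pyRange 0 (cards.length : Int) 1).filter
          (fun k => decide (¬(i = j ∨ j = k ∨ k = i) ∧ PySem.List.pyGetD cards i 0 + PySem.List.pyGetD cards j 0 + PySem.List.pyGetD cards k 0 ≤ n))).map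
          (fun k => PySem.List.pyGetD cards i 0 + PySem.List.pyGetD cards j 0 + PySem.List.pyGetD cards k 0) := by
    intro acc i j
    rw [← PySem.List.foldl_append_if]
    apply PySem.List.foldl_congr_mem
    intro acc k _
    by_cases h1 : i = j ∨ j = k ∨ k = i <;>
      by_cases h2 : PySem.List.pyGetD cards i 0 + PySem.List.pyGetD cards j 0 + PySem.List.pyGetD cards k 0 ≤ n <;>
      simp [h1, h2]
  have key2 : ∀ (acc : List Int) (i : Int),
      (PySem.List.pyRange 0 (cards.length : Int) 1).foldl (fun acc j =>
        (PySem.List.pyRange 0 (cards.length : Int) 1).foldl (fun acc k =>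
          if i = j ∨ j = k ∨ k = i then acc
          else
            let sum_res := PySem.List.pyGetD cards i 0 + PySem.List.pyGetD cards j 0 + PySem.List.pyGetD cards k 0
            if sum_res ≤ n then acc ++ [sum_res] else acc) acc) acc
      = acc ++ (PySem.List.pyRange 0 (cards.length : Int) 1).flatMap (fun j =>
          ((PySem.List.pyRange 0 (cards.length : Int) 1).filter
            (fun k => decide (¬(i = j ∨ j = k ∨ k = i) ∧ PySem.List.pyGetD cards i 0 + PySem.List.pyGetD cards j 0 + PySem.List.pyGetD cards k 0 ≤ n))).map
            (fun k => PySem.List.pyGetD cards i 0 + PySem.List.pyGetD cards j 0 + PySem.List.pyGetD cards k 0)) := by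
    intro acc i
    rw [← PySem.List.foldl_append_eq_flatMap]
    apply PySem.List.foldl_congr_mem
    intro acc j _
    exact key1 acc i j
  have key3 : itemsA n cards
      = (PySem.List.pyRange 0 (cards.length : Int) 1).flatMap (fun i =>
          (PySem.List.pyRange 0 (cards.length : Int) 1).flatMap (fun j =>
          ((PySem.List.pyRange 0 (cards.length : Int) 1).filter
            (fun k => decide (¬(i = j ∨ j = k ∨ k = i) ∧ PySem.List.pyGetD cards i 0 + PySem.List.pyGetD cards j 0 + PySem.List.pyGetD cards k 0 ≤ n))).map
            (fun k => PySem.List.pyGetD cards i 0 + PySem.List.pyGetD cards j 0 + PySem.List.pyGetD cards k 0))) := by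
    show (PySem.List.pyRange 0 (cards.length : Int) 1).foldl _ ([] : List Int) = _
    refine Eq.trans ?_ (List.nil_append _)
    rw [← PySem.List.foldl_append_eq_flatMap]
    apply PySem.List.foldl_congr_mem
    intro acc i _
    exact key2 acc i
  rw [key3]
  simp only [List.mem_flatMap, List.mem_map, List.mem_filter, PySem.List.mem_pyRange_one,
    decide_eq_true_eq]
  constructor
  · rintro ⟨i, ⟨hi0, hiL⟩, j, ⟨hj0, hjL⟩, k, ⟨⟨hk0, hkL⟩, hdist, hle⟩, rfl⟩
    push Not at hdist
    obtain ⟨d1, d2, d3⟩ := hdist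
    have ei : PySem.List.pyGetD cards i 0 = cards.getD i.toNat 0 := by
      rw [PySem.List.pyGetD_eq_getElem cards 0 hi0 hiL, List.getD_eq_getElem _ _ (by omega)]
    have ej : PySem.List.pyGetD cards j 0 = cards.getD j.toNat 0 := by
      rw [PySem.List.pyGetD_eq_getElem cards 0 hj0 hjL, List.getD_eq_getElem _ _ (by omega)]
    have ek : PySem.List.pyGetD cards k 0 = cards.getD k.toNat 0 := by
      rw [PySem.List.pyGetD_eq_getElem cards 0 hk0 hkL, List.getD_eq_getElem _ _ (by omega)]
    rw [ei, ej, ek] at hle ⊢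
    refine ⟨distinct_to_ordT cards _ i.toNat j.toNat k.toNat (by omega) (by omega) (by omega)
      (by omega) (by omega) (by omega) rfl, hle⟩
  · rintro ⟨⟨i, j, k, h1, h2, h3, rfl⟩, hle⟩
    have hiL : i < cards.length := by omega
    have hjL : j < cards.length := by omega
    refine ⟨(i : Int), ⟨by omega, by exact_mod_cast Int.ofNat_lt.mpr hiL⟩,
            (j : Int), ⟨by omega, by exact_mod_cast Int.ofNat_lt.mpr hjL⟩,
            (k : Int), ⟨⟨by omega, by exact_mod_cast Int.ofNat_lt.mpr h3⟩, ?_, ?_⟩, ?_⟩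
    · push Not
      refine ⟨by exact_mod_cast (by omega : i ≠ j), by exact_mod_cast (by omega : j ≠ k),
        by exact_mod_cast (by omega : k ≠ i)⟩
    · simp only [PySem.List.pyGetD_natCast]
      exact hle
    · simp only [PySem.List.pyGetD_natCast]

lemma twoPtr_step_le (xs : List Int) (t xk : Int) (i j : Nat) (best : Option Int)
    (hij : i < j) (hs : xs.getD i 0 + xs.getD j 0 ≤ t) :
    twoPtr xs t xk i j best = twoPtr xs t xk (i + 1) j
      (match best with
        | none => some (xs.getD i 0 + xs.getD j 0 + xk)
        | some b => if b < xs.getD i 0 + xs.getD j 0 + xk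
            then some (xs.getD i 0 + xs.getD j 0 + xk) else some b) := by
  cases best <;> (rw [twoPtr]; simp only [if_pos hij, if_pos hs])

lemma twoPtr_step_gt (xs : List Int) (t xk : Int) (i j : Nat) (best : Option Int)
    (hij : i < j) (hs : ¬ xs.getD i 0 + xs.getD j 0 ≤ t) :
    twoPtr xs t xk i j best = twoPtr xs t xk i (j - 1) best := by
  rw [twoPtr]; simp only [if_pos hij, if_neg hs]

-- invariant proof for Source B's two-pointer sweep on a sorted list
lemma twoPtr_correct (xs : List Int) (hmono : ∀ a b : Nat, a ≤ b → b < xs.length → xs.getD a 0 ≤ xs.getD b 0)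
    (n : Int) (k : Nat) (hk : k < xs.length) :
    ∀ (m i j : Nat) (best : Option Int), j - i ≤ m → j < k →
    (∀ a b : Nat, a < b → b < k → (a < i ∨ j < b) → xs.getD a 0 + xs.getD b 0 ≤ n - xs.getD k 0 →
      ∃ v, best = some v ∧ xs.getD a 0 + xs.getD b 0 + xs.getD k 0 ≤ v) →
    (∀ v, best = some v → OrdT xs v ∧ v ≤ n) →
    (∀ v, best = some v → ∃ v', twoPtr xs (n - xs.getD k 0) (xs.getD k 0) i j best = some v' ∧ v ≤ v') ∧
    (∀ a b : Nat, a < b → b < k → xs.getD a 0 + xs.getD b 0 ≤ n - xs.getD k 0 →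
      ∃ v, twoPtr xs (n - xs.getD k 0) (xs.getD k 0) i j best = some v ∧ xs.getD a 0 + xs.getD b 0 + xs.getD k 0 ≤ v) ∧
    (∀ v, twoPtr xs (n - xs.getD k 0) (xs.getD k 0) i j best = some v → OrdT xs v ∧ v ≤ n) := by
  intro m
  induction m with
  | zero =>
    intro i j best hm hjk h1 h2
    have hij : ¬ i < j := by omega
    rw [twoPtr, if_neg hij]
    exact ⟨fun v hv => ⟨v, hv, le_refl v⟩,
      fun a b hab hbk hsum => h1 a b hab hbk (by omega) hsum, h2⟩
  | succ m ih =>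
    intro i j best hm hjk h1 h2
    by_cases hij : i < j
    · by_cases hs : xs.getD i 0 + xs.getD j 0 ≤ n - xs.getD k 0
      · have hstep := twoPtr_step_le xs (n - xs.getD k 0) (xs.getD k 0) i j best hij hs
        set cand := xs.getD i 0 + xs.getD j 0 + xs.getD k 0 with hcand
        obtain ⟨w, hw, hcw, hbw, hor⟩ : ∃ w,
            (match best with
              | none => some cand
              | some b => if b < cand then some cand else some b) = some w ∧
            cand ≤ w ∧ (∀ v, best = some v → v ≤ w) ∧ (w = cand ∨ best = some w) := by
          cases best with
          | none => exact ⟨cand, rfl, le_refl _, fun v hv => absurd hv (by simp), Or.inl rfl⟩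
          | some b =>
            by_cases hbc : b < cand
            · exact ⟨cand, by simp [hbc], le_refl _,
                fun v hv => by injection hv with hv; omega, Or.inl rfl⟩
            · exact ⟨b, by simp [hbc], by omega,
                fun v hv => by injection hv with hv; omega, Or.inr rfl⟩
        rw [hstep, hw]
        have h2' : ∀ v, some w = some v → OrdT xs v ∧ v ≤ n := by
          intro v hv
          injection hv with hv; subst hv
          rcases hor with rfl | hb
          · exact ⟨⟨i, j, k, hij, hjk, hk, rfl⟩, by omega⟩
          · exact h2 w hb
        have h1' : ∀ a b : Nat, a < b → b < k → (a < i + 1 ∨ j < b) →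
            xs.getD a 0 + xs.getD b 0 ≤ n - xs.getD k 0 →
            ∃ v, (some w : Option Int) = some v ∧ xs.getD a 0 + xs.getD b 0 + xs.getD k 0 ≤ v := by
          intro a b hab hbk hside hsum
          refine ⟨w, rfl, ?_⟩
          by_cases hold : a < i ∨ j < b
          · obtain ⟨v, hv, hbound⟩ := h1 a b hab hbk hold hsum
            have := hbw v hv; omega
          · have ha : a = i := by omega
            have hbj : b ≤ j := by omega
            have := hmono b j hbj (by omega)
            subst ha; omega
        obtain ⟨c0, c1, c2⟩ := ih (i + 1) j (some w) (by omega) hjk h1' h2'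
        refine ⟨?_, c1, c2⟩
        intro v hv
        obtain ⟨v', hv', hvv'⟩ := c0 w rfl
        exact ⟨v', hv', le_trans (hbw v hv) hvv'⟩
      · have hstep := twoPtr_step_gt xs (n - xs.getD k 0) (xs.getD k 0) i j best hij hs
        rw [hstep]
        have h1' : ∀ a b : Nat, a < b → b < k → (a < i ∨ j - 1 < b) →
            xs.getD a 0 + xs.getD b 0 ≤ n - xs.getD k 0 →
            ∃ v, best = some v ∧ xs.getD a 0 + xs.getD b 0 + xs.getD k 0 ≤ v := by
          intro a b hab hbk hside hsum
          by_cases hold : a < i ∨ j < b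
          · exact h1 a b hab hbk hold hsum
          · have hbj : b = j := by omega
            have hai : i ≤ a := by omega
            have := hmono i a hai (by omega)
            subst hbj; omega
        exact ih i (j - 1) best (by omega) (by omega) h1' h2
    · rw [twoPtr, if_neg hij]
      exact ⟨fun v hv => ⟨v, hv, le_refl v⟩,
        fun a b hab hbk hsum => h1 a b hab hbk (by omega) hsum, h2⟩

-- B's outer loop: after the cards with index < K are processed, best bounds every
-- admissible triple sum with largest index < K, and any value it holds is such a sum
lemma outer_correct (n : Int) (xs : List Int)
    (hmono : ∀ a b : Nat, a ≤ b → b < xs.length → xs.getD a 0 ≤ xs.getD b 0) :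
    ∀ K : Nat, K ≤ xs.length →
    (∀ x, (∃ i j k : Nat, i < j ∧ j < k ∧ k < K ∧ x = xs.getD i 0 + xs.getD j 0 + xs.getD k 0) → x ≤ n →
      ∃ v, bestB n xs K = some v ∧ x ≤ v) ∧
    (∀ v, bestB n xs K = some v → OrdT xs v ∧ v ≤ n) := by
  intro K
  induction K with
  | zero =>
    intro _
    unfold bestB
    rw [PySem.List.pyRange_one_eq_nil (by omega)]
    constructor
    · rintro x ⟨i, j, k, h1, h2, h3, rfl⟩ hxn; omega
    · intro v hv; exact absurd hv (by simp)
  | succ K ihK =>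
    intro hK1
    unfold bestB
    by_cases h2K : 2 ≤ K
    · obtain ⟨ih1, ih2⟩ := ihK (by omega)
      unfold bestB at ih1 ih2
      have hr : PySem.List.pyRange 2 ((K + 1 : Nat) : Int) 1
          = PySem.List.pyRange 2 (K : Int) 1 ++ [(K : Int)] := by
        have hc : ((K + 1 : Nat) : Int) = (K : Int) + 1 := by push_cast; ring
        rw [hc, PySem.List.pyRange_one_succ_right (by omega)]
      rw [hr, List.foldl_append]
      simp only [List.foldl_cons, List.foldl_nil, PySem.List.pyGetD_natCast, Int.toNat_natCast]
      set prev := (PySem.List.pyRange 2 (K : Int) 1).foldl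
        (fun best k =>
          twoPtr xs (n - PySem.List.pyGetD xs k 0) (PySem.List.pyGetD xs k 0) 0 (k.toNat - 1) best)
        none with hprev
      obtain ⟨c0, c1, c2⟩ := twoPtr_correct xs hmono n K (by omega) K 0 (K - 1) prev
        (by omega) (by omega)
        (by intro a b hab hbk hside hsum; exact absurd hside (by omega))
        ih2
      refine ⟨?_, c2⟩
      rintro x ⟨i, j, k, h1, h2, h3, rfl⟩ hxn
      by_cases hkK : k = K
      · subst hkK
        exact c1 i j h1 h2 (by omega)
      · obtain ⟨v, hv, hxv⟩ := ih1 _ ⟨i, j, k, h1, h2, by omega, rfl⟩ hxn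
        obtain ⟨v', hv', hvv'⟩ := c0 v hv
        exact ⟨v', hv', by omega⟩
    · rw [PySem.List.pyRange_one_eq_nil (by omega)]
      constructor
      · rintro x ⟨i, j, k, h1, h2, h3, rfl⟩ hxn; omega
      · intro v hv; exact absurd hv (by simp)

-- ===== VERDICT (by name: the statement is the Claim_ definition above) =====
theorem solve_spec : Claim_equal_solve := by
  intro n cards _ hpre
  unfold Spec_solve
  have e1 : solve n cards = (PySem.List.max? (itemsA n cards) (fun x => x)).getD 0 := rfl
  have e2 : solve_alt n cards
      = (bestB n (PySem.List.sorted cards (fun x => x) false)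
          (PySem.List.sorted cards (fun x => x) false).length).getD 0 := rfl
  have hperm : (PySem.List.sorted cards (fun x => x) false).Perm cards :=
    PySem.List.sorted_perm cards (fun x => x) false
  have hmono : ∀ a b : Nat, a ≤ b → b < (PySem.List.sorted cards (fun x => x) false).length →
      (PySem.List.sorted cards (fun x => x) false).getD a 0
        ≤ (PySem.List.sorted cards (fun x => x) false).getD b 0 := by
    intro a b hab hb
    rcases Nat.eq_or_lt_of_le hab with rfl | hlt
    · exact le_refl _
    · have hp := PySem.List.sorted_pairwise cards (fun x => x)
      rw [List.pairwise_iff_getElem] at hp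
      have ha : a < (PySem.List.sorted cards (fun x => x) false).length := by omega
      rw [List.getD_eq_getElem _ _ ha, List.getD_eq_getElem _ _ hb]
      exact hp a b ha hb hlt
  obtain ⟨houter1, houter2⟩ :=
    outer_correct n (PySem.List.sorted cards (fun x => x) false) hmono
      (PySem.List.sorted cards (fun x => x) false).length le_rfl
  obtain ⟨k0, hk0, j0, hj0, i0, hi0, hsum0⟩ := hpre
  have hx0c : OrdT cards (cards.getD i0 0 + cards.getD j0 0 + cards.getD k0 0) :=
    ⟨i0, j0, k0, hi0, hj0, hk0, rfl⟩
  rw [e1, e2]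
  cases hmax : PySem.List.max? (itemsA n cards) (fun x => x) with
  | none =>
    rw [PySem.List.max?_eq_none_iff] at hmax
    have hmem := (mem_items n cards _).mpr ⟨hx0c, hsum0⟩
    rw [hmax] at hmem
    exact absurd hmem (by simp)
  | some m =>
    have hmOrd := (mem_items n cards m).mp (PySem.List.max?_mem hmax)
    have hmaxBound := PySem.List.max?_isMax hmax
    have hmxs : OrdT (PySem.List.sorted cards (fun x => x) false) m :=
      (ordT_iff_of_perm hperm m).mpr hmOrd.1
    obtain ⟨v, hv, hmv⟩ := houter1 m hmxs hmOrd.2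
    have hvs := houter2 v hv
    have hvc : OrdT cards v := (ordT_iff_of_perm hperm v).mp hvs.1
    have hvm : v ≤ m := hmaxBound v ((mem_items n cards v).mpr ⟨hvc, hvs.2⟩)
    rw [hv]
    simp only [Option.getD_some]
    omega
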